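-- pv_equiv track=rewrite | github.com/elliot-addy/LISG | emulator.py | count_multi_indices
-- ===== SOURCE A (Python) =====
-- from collections import defaultdict
--
-- def count_multi_indices(m, k, sub_penalty):
-- 	'''
-- 	Count the number of multi-indices l in N_0^k such that |l| = m and
-- 	l_i <= sub_penalty_i for all i.
-- 	'''
-- 	p = sub_penalty[:k]
-- 	# dp[i][s] = number of ways to assign first i components to sum to s.
-- 	dp = [defaultdict(int) for _ in range(k+1)]
-- 	dp[0][0] = 1 # base case: zero sum with zero components.
--
-- 	for i in range(1, k + 1):
-- 		for s in range(m + 1):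
-- 			for l_i in range(int(min(p[i - 1], s) + 1)):
-- 				dp[i][s] += dp[i - 1][s - l_i]
--
-- 	return dp[k][m]
-- ===== SOURCE B (Python) =====
-- def count_multi_indices(m, k, sub_penalty):
-- 	'''
-- 	Count the number of multi-indices l in N_0^k such that |l| = m and
-- 	l_i <= sub_penalty_i for all i, keeping a single dp row and updating
-- 	it through a running prefix sum (sliding window), O(k*m).
-- 	'''
-- 	if m < 0:
-- 		return 0
-- 	pens = sub_penalty[:k]
-- 	if not pens:
-- 		return 1 if m == 0 else 0
-- 	row = [1] + [0] * m
-- 	for c in pens: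
-- 		if c < 0:
-- 			row = [0] * (m + 1)
-- 		else:
-- 			cc = min(c, m)
-- 			pre = []
-- 			t = 0
-- 			for v in row:
-- 				t += v
-- 				pre.append(t)
-- 			row = [a - b for a, b in zip(pre, [0] * (cc + 1) + pre)]
-- 	return row[m]
-- ===== Notes on version B (the rewrite author's own statement) =====
-- stated objective: faster
-- what changed: Replaces A's (k+1)-row table of defaultdicts with a per-cell inner summation loop by a single dp row updated via a prefix-sum array, so each windowed sum costs O(1) instead of O(min(p_i,m)).
import Mathlib
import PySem

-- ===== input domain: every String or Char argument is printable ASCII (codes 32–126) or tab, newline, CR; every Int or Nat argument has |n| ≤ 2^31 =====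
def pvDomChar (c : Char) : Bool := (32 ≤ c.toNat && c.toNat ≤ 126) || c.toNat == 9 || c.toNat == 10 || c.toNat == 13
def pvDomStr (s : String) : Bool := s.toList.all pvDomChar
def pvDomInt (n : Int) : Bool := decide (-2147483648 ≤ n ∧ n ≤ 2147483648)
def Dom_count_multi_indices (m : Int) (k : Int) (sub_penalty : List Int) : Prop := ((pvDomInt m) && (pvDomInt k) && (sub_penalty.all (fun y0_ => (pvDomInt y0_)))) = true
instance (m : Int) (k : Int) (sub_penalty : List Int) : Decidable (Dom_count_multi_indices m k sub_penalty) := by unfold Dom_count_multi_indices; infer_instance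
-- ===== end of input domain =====

-- B replaces the table-of-dicts DP whose cells are filled by an inner summation loop
-- by a single dp row updated through a running prefix sum (windowed sums in O(1)).

-- ===== PORT A =====
-- body of A's loop over i: dp[i] is built in place from dp[i-1]; Python mutates dp[i]
-- inside the list dp while dp[i-1] stays untouched during iteration i, so reading
-- dp[i-1] from the pre-iteration list is exact.  defaultdict(int) is ported as a hash
-- map read with default 0 ('dp[i][s] += x' = insert s (getD s 0 + x)); the keys a
-- Python defaultdict READ auto-creates carry value 0 and are never observed.
def pvBodyA (m : Int) (p : List Int) (dp : List (Std.HashMap Int Int)) (i : Int) : List (Std.HashMap Int Int) :=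
  dp.modify i.toNat (fun di =>
    (PySem.List.pyRange 0 (m+1)).foldl (fun di s =>
      (PySem.List.pyRange 0 (min (PySem.List.pyGetD p (i-1) 0) s + 1)).foldl
        (fun di l_i => di.insert s (di.getD s 0 +
          (PySem.List.pyGetD dp (i-1) (∅ : Std.HashMap Int Int)).getD (s - l_i) 0)) di) di)

def count_multi_indices (m : Int) (k : Int) (sub_penalty : List Int) : Int :=
  let p := PySem.List.slice sub_penalty none (some k)
  let dp : List (Std.HashMap Int Int) :=
    (PySem.List.pyRange 0 (k+1)).map (fun _ => (∅ : Std.HashMap Int Int))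
  let dp := dp.modify 0 (fun d => d.insert 0 1)
  let dp := (PySem.List.pyRange 1 (k+1)).foldl (pvBodyA m p) dp
  (PySem.List.pyGetD dp k (∅ : Std.HashMap Int Int)).getD m 0

-- ===== PORT B =====
-- body of B's loop over the penalties: rebuild the row from its running prefix sums
-- (the appending Python loop 'pre.append(t)' is an Array push; zip pairs each prefix
-- sum with the one c+1 places earlier).
def pvBodyB (m : Int) (row : List Int) (c : Int) : List Int :=
  if c < 0 then List.replicate (m+1).toNat 0
  else
    let cc := min c m
    let pre := ((row.foldl (fun (tp : Int × Array Int) v =>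
      let t := tp.1 + v; (t, tp.2.push t)) ((0 : Int), (#[] : Array Int))).2).toList
    (pre.zip (List.replicate (cc+1).toNat 0 ++ pre)).map (fun ab => ab.1 - ab.2)

def count_multi_indices_alt (m : Int) (k : Int) (sub_penalty : List Int) : Int :=
  if m < 0 then 0
  else
    let pens := PySem.List.slice sub_penalty none (some k)
    if pens = [] then (if m = 0 then 1 else 0)
    else
      let row : List Int := 1 :: List.replicate m.toNat 0
      let row := pens.foldl (pvBodyB m) row
      PySem.List.pyGetD row m 0

-- ===== PRECONDITION & SPEC =====
-- Pre_ excludes exactly the inputs on which A raises IndexError: k < 0 (dp[0] = 1 on an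
-- empty dp list) and k > len(sub_penalty) with 0 ≤ m (p[i-1] out of range).
def Pre_count_multi_indices (m : Int) (k : Int) (sub_penalty : List Int) : Prop :=
  0 ≤ k ∧ (k ≤ (sub_penalty.length : Int) ∨ m < 0)
instance (m : Int) (k : Int) (sub_penalty : List Int) : Decidable (Pre_count_multi_indices m k sub_penalty) := by unfold Pre_count_multi_indices; infer_instance

def pvWitness_count_multi_indices : Int × Int × List Int := (3, 2, [2, 5])

def Spec_count_multi_indices (m : Int) (k : Int) (sub_penalty : List Int) (out : Int) : Prop := out = count_multi_indices_alt m k sub_penalty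
instance (m : Int) (k : Int) (sub_penalty : List Int) (out : Int) : Decidable (Spec_count_multi_indices m k sub_penalty out) := by unfold Spec_count_multi_indices; infer_instance

-- ===== CLAIM (what is proved, stated in full; the proofs are below) =====
def Claim_equal_count_multi_indices : Prop := ∀ (m : Int) (k : Int) (sub_penalty : List Int), Dom_count_multi_indices m k sub_penalty → Pre_count_multi_indices m k sub_penalty → Spec_count_multi_indices m k sub_penalty (count_multi_indices m k sub_penalty)

-- ===== LEMMAS AND PROOFS =====

-- the mathematical reference: the window step of the counting recurrence, folded over
-- the penalty list; both ports are shown to compute pvG p m.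
def pvBase : Int → Int := fun s => if s = 0 then 1 else 0
def pvStep (c : Int) (F : Int → Int) : Int → Int :=
  fun s => ((PySem.List.pyRange 0 (min c s + 1)).map (fun l => F (s - l))).sum
def pvG (q : List Int) : Int → Int := q.foldl (fun F c => pvStep c F) pvBase

theorem pvStep_congr (c s : Int) (F F' : Int → Int) (h : ∀ x, 0 ≤ x → x ≤ s → F x = F' x) :
    pvStep c F s = pvStep c F' s := by
  unfold pvStep
  congr 1
  apply List.map_congr_left
  intro l hl
  rw [PySem.List.mem_pyRange_one] at hl
  exact h _ (by omega) (by omega)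

theorem pvG_take_succ (p : List Int) (n : Nat) (h : n < p.length) :
    pvG (p.take (n+1)) = pvStep p[n] (pvG (p.take n)) := by
  have h1 : p.take (n+1) = p.take n ++ [p[n]] := by
    rw [List.take_add_one, List.getElem?_eq_getElem h]
    rfl
  rw [h1]
  unfold pvG
  rw [List.foldl_append]
  simp only [List.foldl_cons, List.foldl_nil]

theorem pvModify_id {α : Type} (l : List α) (i : Nat) : l.modify i (fun x => x) = l := by
  apply List.ext_getElem (by simp [List.length_modify])
  intro j h1 h2
  rw [List.getElem_modify]
  split <;> rfl

theorem pv_pyGetD_modify {α : Type} (l : List α) (j : Nat) (f : α → α) (idx : Int) (d : α)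
    (h0 : 0 ≤ idx) (h1 : idx < (l.length : Int)) :
    PySem.List.pyGetD (l.modify j f) idx d
      = if idx = (j : Int) then f (PySem.List.pyGetD l idx d) else PySem.List.pyGetD l idx d := by
  rw [PySem.List.pyGetD_eq_getElem _ _ h0 (by simpa [List.length_modify] using h1),
      List.getElem_modify, PySem.List.pyGetD_eq_getElem _ _ h0 h1]
  by_cases h : idx = (j : Int)
  · rw [if_pos h, if_pos (by omega)]
  · rw [if_neg h, if_neg (by omega)]

-- ---- A side ----

theorem A_lloop (prev : Std.HashMap Int Int) (s : Int) :
    ∀ (L : List Int) (di : Std.HashMap Int Int) (s' : Int),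
    ((L.foldl (fun di l_i => di.insert s (di.getD s 0
        + prev.getD (s - l_i) 0)) di).getD s' 0)
      = if s' = s then di.getD s' 0 + (L.map (fun l => prev.getD (s - l) 0)).sum
        else di.getD s' 0 := by
  intro L
  induction L with
  | nil => intro di s'; by_cases h : s' = s <;> simp [h]
  | cons a t ih =>
    intro di s'
    simp only [List.foldl_cons, List.map_cons, List.sum_cons]
    rw [ih]
    by_cases h : s' = s
    · subst h
      rw [if_pos rfl, if_pos rfl, Std.HashMap.getD_insert]
      simp only [beq_self_eq_true, if_true]
      ring
    · simp only [if_neg h]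
      rw [Std.HashMap.getD_insert, if_neg (by simp only [beq_iff_eq]; exact Ne.symm h)]

theorem A_sloop (c : Int) (prev : Std.HashMap Int Int) :
    ∀ (t : Nat) (s' : Int),
    (((PySem.List.pyRange 0 (t : Int)).foldl
        (fun di s => (PySem.List.pyRange 0 (min c s + 1)).foldl
          (fun di l_i => di.insert s (di.getD s 0
            + prev.getD (s - l_i) 0)) di)
        (∅ : Std.HashMap Int Int)).getD s' 0)
      = if 0 ≤ s' ∧ s' < (t : Int) then pvStep c (fun x => prev.getD x 0) s' else 0 := by
  intro t
  induction t with
  | zero =>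
    intro s'
    rw [PySem.List.pyRange_one_eq_nil (by omega)]
    simp only [List.foldl_nil, Std.HashMap.getD_empty]
    rw [if_neg (by omega)]
  | succ t ih =>
    intro s'
    rw [show ((t+1 : Nat) : Int) = (t : Int) + 1 by push_cast; ring,
        PySem.List.pyRange_one_succ_right (by omega), List.foldl_append]
    simp only [List.foldl_cons, List.foldl_nil]
    rw [A_lloop, ih]
    by_cases h : s' = (t : Int)
    · subst h
      rw [if_pos rfl, if_neg (by omega), if_pos (by omega)]
      simp [pvStep]
    · rw [if_neg h]
      by_cases h2 : 0 ≤ s' ∧ s' < (t : Int)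
      · rw [if_pos h2, if_pos (by omega)]
      · rw [if_neg h2, if_neg (by omega)]

theorem A_step (m : Int) (hm : 0 ≤ m) (p : List Int) (dpn : List (Std.HashMap Int Int)) (n : Nat)
    (hn1 : n + 1 ≤ p.length)
    (h1 : dpn.length = p.length + 1)
    (h2 : ∀ idx : Int, (n : Int) < idx → idx ≤ (p.length : Int) →
      PySem.List.pyGetD dpn idx (∅ : Std.HashMap Int Int) = (∅ : Std.HashMap Int Int))
    (h3 : ∀ s', (PySem.List.pyGetD dpn (n : Int) (∅ : Std.HashMap Int Int)).getD s' 0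
      = if 0 ≤ s' ∧ s' ≤ m then pvG (p.take n) s' else 0) :
    (pvBodyA m p dpn ((n : Int)+1)).length = p.length + 1
    ∧ (∀ idx : Int, ((n+1 : Nat) : Int) < idx → idx ≤ (p.length : Int) →
        PySem.List.pyGetD (pvBodyA m p dpn ((n : Int)+1)) idx (∅ : Std.HashMap Int Int) = (∅ : Std.HashMap Int Int))
    ∧ (∀ s', (PySem.List.pyGetD (pvBodyA m p dpn ((n : Int)+1)) ((n+1 : Nat) : Int) (∅ : Std.HashMap Int Int)).getD s' 0
        = if 0 ≤ s' ∧ s' ≤ m then pvG (p.take (n+1)) s' else 0) := by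
  unfold pvBodyA
  rw [show ((n : Int)+1).toNat = n+1 by omega, show ((n : Int)+1)-1 = (n : Int) by ring]
  refine ⟨by simp [List.length_modify, h1], ?_, ?_⟩
  · intro idx hlt hle
    rw [pv_pyGetD_modify _ _ _ _ _ (by omega) (by omega), if_neg (by push_cast at hlt ⊢; omega)]
    exact h2 idx (by push_cast at hlt ⊢; omega) hle
  · intro s'
    rw [pv_pyGetD_modify _ _ _ _ _ (by push_cast; omega) (by push_cast; omega),
        if_pos (by push_cast; ring)]
    rw [show ((n+1 : Nat) : Int) = (n : Int) + 1 by push_cast; ring]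
    rw [h2 ((n : Int)+1) (by omega) (by omega)]
    have hc : PySem.List.pyGetD p (n : Int) 0 = p[n]'(by omega) :=
      PySem.List.pyGetD_eq_getElem _ _ (by omega) (by push_cast; omega)
    rw [show (m+1 : Int) = ((m+1).toNat : Int) by omega, A_sloop, show (((m+1).toNat : Nat) : Int) = m + 1 by omega]
    by_cases hr : 0 ≤ s' ∧ s' ≤ m
    · rw [if_pos (by omega), if_pos hr]
      have hcong : pvStep (PySem.List.pyGetD p (n : Int) 0)
          (fun x => (PySem.List.pyGetD dpn (n : Int) (∅ : Std.HashMap Int Int)).getD x 0) s'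
          = pvStep (PySem.List.pyGetD p (n : Int) 0) (pvG (p.take n)) s' :=
        pvStep_congr _ _ _ _ (fun x hx0 hx1 => by rw [h3 x, if_pos ⟨hx0, by omega⟩])
      rw [hcong, hc, pvG_take_succ p n (by omega)]
    · rw [if_neg (by omega), if_neg hr]

theorem A_iloop (m k : Int) (p : List Int) (hm : 0 ≤ m) (hk : 0 ≤ k)
    (hpl : (p.length : Int) = k) :
    ∀ n : Nat, n ≤ p.length →
    ((PySem.List.pyRange 1 ((n : Int)+1)).foldl (pvBodyA m p)
        (((PySem.List.pyRange 0 (k+1)).map (fun _ => (∅ : Std.HashMap Int Int))).modify 0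
          (fun d => d.insert 0 1))).length = p.length + 1
    ∧ (∀ idx : Int, (n : Int) < idx → idx ≤ (p.length : Int) →
        PySem.List.pyGetD ((PySem.List.pyRange 1 ((n : Int)+1)).foldl (pvBodyA m p)
          (((PySem.List.pyRange 0 (k+1)).map (fun _ => (∅ : Std.HashMap Int Int))).modify 0
            (fun d => d.insert 0 1))) idx (∅ : Std.HashMap Int Int) = (∅ : Std.HashMap Int Int))
    ∧ (∀ s', (PySem.List.pyGetD ((PySem.List.pyRange 1 ((n : Int)+1)).foldl (pvBodyA m p)
          (((PySem.List.pyRange 0 (k+1)).map (fun _ => (∅ : Std.HashMap Int Int))).modify 0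
            (fun d => d.insert 0 1))) (n : Int) (∅ : Std.HashMap Int Int)).getD s' 0
        = if 0 ≤ s' ∧ s' ≤ m then pvG (p.take n) s' else 0) := by
  have hlen0 : (((PySem.List.pyRange 0 (k+1)).map (fun _ => (∅ : Std.HashMap Int Int))).modify 0
      (fun d => d.insert 0 1)).length = p.length + 1 := by
    simp [List.length_modify, PySem.List.length_pyRange_one]
    omega
  have hmap : ∀ idx : Int, 0 ≤ idx → idx ≤ (p.length : Int) →
      PySem.List.pyGetD ((PySem.List.pyRange 0 (k+1)).map (fun _ => (∅ : Std.HashMap Int Int))) idx (∅ : Std.HashMap Int Int) = (∅ : Std.HashMap Int Int) := by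
    intro idx hi0 hi1
    rw [PySem.List.pyGetD_eq_getElem _ _ hi0
      (by simp [PySem.List.length_pyRange_one]; try omega)]
    simp
  have hdp0 : ∀ idx : Int, 0 ≤ idx → idx ≤ (p.length : Int) →
      PySem.List.pyGetD (((PySem.List.pyRange 0 (k+1)).map (fun _ => (∅ : Std.HashMap Int Int))).modify 0
        (fun d => d.insert 0 1)) idx (∅ : Std.HashMap Int Int)
      = if idx = 0 then (∅ : Std.HashMap Int Int).insert 0 1 else (∅ : Std.HashMap Int Int) := by
    intro idx hi0 hi1
    rw [pv_pyGetD_modify _ _ _ _ _ hi0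
      (by simp [PySem.List.length_pyRange_one]; try omega)]
    rw [hmap idx hi0 hi1]
    norm_num
  intro n
  induction n with
  | zero =>
    intro _
    rw [show (((0 : Nat) : Int)+1) = 1 by norm_num,
        PySem.List.pyRange_one_eq_nil (a := 1) (b := 1) (le_refl 1)]
    simp only [List.foldl_nil]
    refine ⟨hlen0, ?_, ?_⟩
    · intro idx hlt hle
      rw [hdp0 idx (by omega) hle, if_neg (by omega)]
    · intro s'
      rw [show ((0 : Nat) : Int) = 0 by norm_num, hdp0 0 (by omega) (by omega), if_pos rfl,
          Std.HashMap.getD_insert]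
      by_cases h0 : s' = 0
      · subst h0
        rw [if_pos (by simp), if_pos ⟨le_refl 0, hm⟩]
        simp [pvG, pvBase]
      · rw [if_neg (by simp only [beq_iff_eq]; exact Ne.symm h0), Std.HashMap.getD_empty]
        by_cases hr : 0 ≤ s' ∧ s' ≤ m
        · rw [if_pos hr]; simp [pvG, pvBase, h0]
        · rw [if_neg hr]
  | succ n ih =>
    intro hn1
    obtain ⟨g1, g2, g3⟩ := ih (by omega)
    rw [show (((n+1 : Nat) : Int)+1) = ((n : Int)+1)+1 by push_cast; ring,
        PySem.List.pyRange_one_succ_right (a := 1) (b := (n : Int)+1) (by omega), List.foldl_append]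
    simp only [List.foldl_cons, List.foldl_nil]
    exact A_step m hm p _ n hn1 g1 g2 g3

-- ---- B side ----

def pvPS (row : List Int) (u : Int) : Int :=
  ((PySem.List.pyRange 0 u).map (fun x => PySem.List.pyGetD row x 0)).sum

def pvScan (t : Int) : List Int → List Int
  | [] => []
  | v :: r => (t + v) :: pvScan (t + v) r

theorem pv_fold_push (row : List Int) : ∀ (t : Int) (arr : Array Int),
    ((row.foldl (fun (tp : Int × Array Int) v =>
        let t := tp.1 + v; (t, tp.2.push t)) (t, arr)).2).toList
      = arr.toList ++ pvScan t row := by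
  induction row with
  | nil => intro t arr; simp [pvScan]
  | cons v r ih =>
    intro t arr
    rw [List.foldl_cons]
    simpa [pvScan, Array.toList_push, List.append_assoc] using ih (t+v) (arr.push (t+v))

theorem pvScan_length : ∀ (row : List Int) (t : Int), (pvScan t row).length = row.length := by
  intro row
  induction row with
  | nil => intro t; rfl
  | cons v r ih => intro t; simp [pvScan, ih]

theorem pvPS_zero (row : List Int) : pvPS row 0 = 0 := by
  unfold pvPS
  rw [PySem.List.pyRange_one_eq_nil (a := 0) (b := 0) (le_refl 0)]
  rfl

theorem pvPS_cons (v : Int) (r : List Int) : ∀ (u : Int), 0 ≤ u →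
    pvPS (v :: r) (u+1) = v + pvPS r u := by
  intro u hu
  unfold pvPS
  rw [PySem.List.pyRange_one_cons (by omega : (0 : Int) < u+1)]
  simp only [List.map_cons, List.sum_cons]
  congr 1
  · exact PySem.List.pyGetD_zero_cons _ _ _
  · rw [show ((0 : Int)+1) = 1 by norm_num]
    rw [PySem.List.pyRange_one 1 (u+1), PySem.List.pyRange_one 0 u]
    rw [show ((u+1) - 1 : Int) = u - 0 by ring]
    rw [List.map_map, List.map_map]
    congr 1
    apply List.map_congr_left
    intro a _
    simp only [Function.comp_apply]
    rw [show (1 + (a : Int)) = ((a+1 : Nat) : Int) by push_cast; ring,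
        show ((0 : Int) + (a : Int)) = ((a : Nat) : Int) by push_cast; ring]
    rw [PySem.List.pyGetD_natCast, PySem.List.pyGetD_natCast]
    simp [List.getD_cons_succ]

theorem pvScan_getElem : ∀ (row : List Int) (t : Int) (j : Nat) (h : j < (pvScan t row).length),
    (pvScan t row)[j] = t + pvPS row ((j : Int)+1) := by
  intro row
  induction row with
  | nil => intro t j h; simp [pvScan] at h
  | cons v r ih =>
    intro t j h
    cases j with
    | zero =>
      simp only [pvScan, List.getElem_cons_zero]
      rw [show (((0 : Nat) : Int)+1) = (0 : Int)+1 by norm_num,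
          pvPS_cons v r 0 (le_refl 0), pvPS_zero]
      ring
    | succ jj =>
      simp only [pvScan, List.getElem_cons_succ]
      rw [ih (t+v) jj (by simpa [pvScan, pvScan_length] using h)]
      rw [show ((jj+1 : Nat) : Int) + 1 = ((jj : Int)+1) + 1 by push_cast; ring,
          pvPS_cons v r ((jj : Int)+1) (by omega)]
      ring

theorem pv_sum_reindex : ∀ (n : Nat) (s : Int) (F : Int → Int),
    ((PySem.List.pyRange (s + 1 - n) (s+1)).map F).sum
      = ((PySem.List.pyRange 0 (n : Int)).map (fun l => F (s - l))).sum := by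
  intro n
  induction n with
  | zero =>
    intro s F
    rw [show ((0 : Nat) : Int) = 0 by norm_num,
        PySem.List.pyRange_one_eq_nil (a := s + 1 - 0) (b := s+1) (by omega),
        PySem.List.pyRange_one_eq_nil (a := 0) (b := 0) (le_refl 0)]
    simp
  | succ n ih =>
    intro s F
    rw [PySem.List.pyRange_one_cons (by push_cast; omega : s + 1 - ((n+1 : Nat) : Int) < s + 1)]
    rw [show s + 1 - ((n+1 : Nat) : Int) + 1 = s + 1 - (n : Int) by push_cast; ring]
    simp only [List.map_cons, List.sum_cons]
    rw [ih s F]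
    rw [show ((n+1 : Nat) : Int) = (n : Int) + 1 by push_cast; ring,
        PySem.List.pyRange_one_succ_right (by omega), List.map_append, List.sum_append]
    simp only [List.map_cons, List.map_nil, List.sum_cons, List.sum_nil]
    rw [show s + 1 - ((n : Int) + 1) = s - (n : Int) by ring]
    ring

theorem pv_window (F : Int → Int) (c s : Int) (hc : 0 ≤ c) (hs : 0 ≤ s) :
    ((PySem.List.pyRange 0 (s+1)).map F).sum - ((PySem.List.pyRange 0 (max (s-c) 0)).map F).sum
      = ((PySem.List.pyRange 0 (min c s + 1)).map (fun l => F (s - l))).sum := by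
  rw [PySem.List.pyRange_one_append 0 (max (s-c) 0) (s+1) (by omega) (by omega),
      List.map_append, List.sum_append, add_sub_cancel_left]
  have h1 : max (s-c) 0 = s + 1 - (((min c s + 1).toNat : Nat) : Int) := by omega
  rw [h1, pv_sum_reindex, show (((min c s + 1).toNat : Nat) : Int) = min c s + 1 by omega]

theorem B_step (m : Int) (hm : 0 ≤ m) (c : Int) (row : List Int)
    (hlen : row.length = (m+1).toNat) (F : Int → Int)
    (hF : ∀ s, 0 ≤ s → s ≤ m → PySem.List.pyGetD row s 0 = F s) :
    (pvBodyB m row c).length = (m+1).toNat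
    ∧ (∀ s, 0 ≤ s → s ≤ m → PySem.List.pyGetD (pvBodyB m row c) s 0 = pvStep c F s) := by
  by_cases hc : c < 0
  · unfold pvBodyB
    rw [if_pos hc]
    refine ⟨by simp, ?_⟩
    intro s hs0 hs1
    rw [PySem.List.pyGetD_eq_getElem _ _ hs0 (by simp; omega)]
    simp only [List.getElem_replicate]
    unfold pvStep
    rw [PySem.List.pyRange_one_eq_nil (by omega)]
    simp
  · push_neg at hc
    have hPS : ∀ u : Int, 0 ≤ u → u ≤ m + 1 → pvPS row u = ((PySem.List.pyRange 0 u).map F).sum := by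
      intro u hu0 hu1
      unfold pvPS
      congr 1
      apply List.map_congr_left
      intro x hx
      rw [PySem.List.mem_pyRange_one] at hx
      exact hF x (by omega) (by omega)
    simp only [pvBodyB]
    rw [if_neg (by omega)]
    rw [pv_fold_push row 0 #[]]
    simp only [show (#[] : Array Int).toList = [] from rfl, List.nil_append]
    have hsl : (pvScan 0 row).length = (m+1).toNat := by rw [pvScan_length, hlen]
    constructor
    · simp [List.length_zip, hsl]
    · intro s hs0 hs1
      rw [PySem.List.pyGetD_eq_getElem _ _ hs0
        (by simp [List.length_zip, hsl]; omega)]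
      simp only [List.getElem_map, List.getElem_zip]
      rw [pvScan_getElem]
      rw [List.getElem_append]
      have hw := pv_window F (min c m) s (by omega) hs0
      rw [show min (min c m) s = min c s from by omega] at hw
      have hgoal : ∀ pad : Int,
          pad = ((PySem.List.pyRange 0 (max (s - min c m) 0)).map F).sum →
          0 + pvPS row (((s.toNat : Nat) : Int) + 1) - pad = pvStep c F s := by
        intro pad hpad
        rw [hpad, show (((s.toNat : Nat) : Int) + 1) = s + 1 by omega, zero_add,
            hPS (s+1) (by omega) (by omega)]
        unfold pvStep
        exact hw
      split_ifs with hsp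
      · apply hgoal
        rw [List.getElem_replicate]
        rw [show max (s - min c m) 0 = 0 from by simp [List.length_replicate] at hsp; omega]
        rw [PySem.List.pyRange_one_eq_nil (a := 0) (b := 0) (le_refl 0)]
        rfl
      · apply hgoal
        rw [pvScan_getElem]
        rw [show ((((s.toNat - (List.replicate (min c m + 1).toNat (0:Int)).length : Nat)) : Int) + 1)
            = max (s - min c m) 0 from by simp [List.length_replicate] at hsp ⊢; omega]
        rw [hPS (max (s - min c m) 0) (by omega) (by omega)]
        ring

theorem B_loop (m : Int) (hm : 0 ≤ m) :
    ∀ (q : List Int) (row : List Int) (F : Int → Int),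
    row.length = (m+1).toNat → (∀ s, 0 ≤ s → s ≤ m → PySem.List.pyGetD row s 0 = F s) →
    (∀ s, 0 ≤ s → s ≤ m →
      PySem.List.pyGetD (q.foldl (pvBodyB m) row) s 0 = (q.foldl (fun F c => pvStep c F) F) s) := by
  intro q
  induction q with
  | nil => intro row F _ h2; simpa using h2
  | cons c t ih =>
    intro row F h1 h2
    simp only [List.foldl_cons]
    obtain ⟨l1, l2⟩ := B_step m hm c row h1 F h2
    exact ih _ _ l1 l2

-- ===== main proof =====

theorem pv_main (m k : Int) (sub_penalty : List Int)
    (hk : 0 ≤ k) (hor : k ≤ (sub_penalty.length : Int) ∨ m < 0) :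
    count_multi_indices m k sub_penalty = count_multi_indices_alt m k sub_penalty := by
  simp only [count_multi_indices, count_multi_indices_alt]
  by_cases hm : m < 0
  · rw [if_pos hm]
    have hrange : PySem.List.pyRange 0 (m+1) = [] := PySem.List.pyRange_one_eq_nil (by omega)
    have hbody : ∀ (dp : List (Std.HashMap Int Int)) (i : Int),
        pvBodyA m (PySem.List.slice sub_penalty none (some k)) dp i = dp := by
      intro dp i
      unfold pvBodyA
      rw [hrange]
      simp only [List.foldl_nil]
      exact pvModify_id _ _
    have hfold : ∀ (L : List Int) (dp : List (Std.HashMap Int Int)),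
        L.foldl (pvBodyA m (PySem.List.slice sub_penalty none (some k))) dp = dp := by
      intro L
      induction L with
      | nil => intro dp; rfl
      | cons a t ih => intro dp; simp only [List.foldl_cons]; rw [hbody]; exact ih dp
    rw [hfold]
    rw [pv_pyGetD_modify _ _ _ _ _ hk
      (by simp [PySem.List.length_pyRange_one]; try omega)]
    by_cases hk0 : k = 0
    · rw [if_pos (show k = ((0 : Nat) : Int) by omega)]
      have hmc : PySem.List.pyGetD ((PySem.List.pyRange 0 (k+1)).map
          (fun _ => (∅ : Std.HashMap Int Int))) k (∅ : Std.HashMap Int Int) = (∅ : Std.HashMap Int Int) := by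
        rw [PySem.List.pyGetD_eq_getElem _ _ hk
          (by simp [PySem.List.length_pyRange_one]; try omega)]
        simp
      rw [hmc, Std.HashMap.getD_insert,
          if_neg (by simp only [beq_iff_eq]; omega), Std.HashMap.getD_empty]
    · rw [if_neg (show ¬ k = ((0 : Nat) : Int) by omega)]
      rw [PySem.List.pyGetD_eq_getElem _ _ hk
        (by simp [PySem.List.length_pyRange_one]; try omega)]
      simp
  · push_neg at hm
    rw [if_neg (by omega)]
    have hk2 : k ≤ (sub_penalty.length : Int) := by
      rcases hor with h | h
      · exact h
      · omega
    have hplen : ((PySem.List.slice sub_penalty none (some k)).length : Int) = k := by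
      rw [PySem.List.slice_to _ hk]
      simp [List.length_take]
      omega
    have hA := A_iloop m k (PySem.List.slice sub_penalty none (some k)) hm hk hplen
      k.toNat (by omega)
    rw [show ((k.toNat : Nat) : Int) = k by omega] at hA
    rw [hA.2.2 m, if_pos ⟨hm, le_refl m⟩,
        show k.toNat = (PySem.List.slice sub_penalty none (some k)).length by omega,
        List.take_length]
    by_cases hpn : PySem.List.slice sub_penalty none (some k) = []
    · rw [if_pos hpn, hpn]
      simp [pvG, pvBase]
    · rw [if_neg hpn]
      have hinit : ∀ s, 0 ≤ s → s ≤ m →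
          PySem.List.pyGetD (1 :: List.replicate m.toNat 0) s 0 = pvBase s := by
        intro s hs0 hs1
        rw [PySem.List.pyGetD_eq_getElem _ _ hs0 (by simp; omega)]
        unfold pvBase
        by_cases h0 : s = 0
        · subst h0; simp
        · rw [if_neg h0]
          obtain ⟨j, hj⟩ : ∃ j, s.toNat = j + 1 := ⟨s.toNat - 1, by omega⟩
          simp only [hj, List.getElem_cons_succ, List.getElem_replicate]
      have hB := B_loop m hm (PySem.List.slice sub_penalty none (some k))
        (1 :: List.replicate m.toNat 0) pvBase (by simp; omega) hinit m hm (le_refl m)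
      rw [hB]
      rfl

-- ===== VERDICT (by name: the statement is the Claim_ definition above) =====
theorem count_multi_indices_spec : Claim_equal_count_multi_indices := by
  intro m k sub_penalty _ hpre
  exact pv_main m k sub_penalty hpre.1 hpre.2
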